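-- pv_equiv track=rewrite | github.com/duyhustvn/python-datastruct-algorithm | 05.searching/04_count_negative_nums_sorted_matrix.py | findFistNegativeNum
-- ===== SOURCE A (Python) =====
-- from typing import List
--
-- def findFistNegativeNum(arr: List[int]) -> int:
--     left = 0
--     right = len(arr)-1
--     while left <= right:
--         mid = left + (right-left)//2
--         if arr[mid] >= 0:
--             left = mid + 1
--         else:
--             right = mid - 1
--     return left
-- ===== SOURCE B (Python) =====
-- from typing import List
--
-- def findFistNegativeNum(arr: List[int]) -> int:
--     # divide and conquer on slices instead of an index loop
--     def go(seg, base):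
--         if not seg:
--             return base
--         m = (len(seg) - 1) // 2
--         if seg[m] >= 0:
--             return go(seg[m+1:], base + m + 1)
--         else:
--             return go(seg[:m], base)
--     return go(arr, 0)
-- ===== Notes on version B (the rewrite author's own statement) =====
-- stated objective: alternative
-- what changed: Replaces the iterative two-pointer binary search over indices with a recursive divide-and-conquer that carves out actual sublist slices and carries an offset accumulator.
import Mathlib
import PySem

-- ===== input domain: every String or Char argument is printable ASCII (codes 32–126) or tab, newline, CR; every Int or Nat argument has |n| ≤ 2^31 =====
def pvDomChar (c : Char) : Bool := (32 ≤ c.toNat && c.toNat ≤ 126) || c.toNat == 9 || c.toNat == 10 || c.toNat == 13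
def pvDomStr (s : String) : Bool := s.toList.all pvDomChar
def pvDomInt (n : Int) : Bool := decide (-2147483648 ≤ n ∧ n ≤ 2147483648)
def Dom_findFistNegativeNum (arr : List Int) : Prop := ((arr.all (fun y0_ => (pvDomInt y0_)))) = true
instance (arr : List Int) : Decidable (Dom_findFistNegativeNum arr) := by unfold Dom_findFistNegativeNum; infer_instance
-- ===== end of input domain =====

-- B replaces the iterative index-based binary search by a recursive divide-and-conquer on list slices (alternative decomposition, same results).


-- ===== PORT A =====
-- the while-loop of A, state (left, right); the fuel argument is only a structural totality
-- guard (the loop runs at most len(arr)+1 times, and callers pass that much fuel);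
-- arr[mid] is provably in range on every call A makes, so the .getD 0 default is never consulted
def pvLoopA : Nat → List Int → Int → Int → Int
  | 0, _, left, _ => left
  | fuel + 1, arr, left, right =>
    if left ≤ right then
      let mid := left + PySem.Int.floordiv (right - left) 2
      if (PySem.List.pyGet? arr mid).getD 0 ≥ 0 then pvLoopA fuel arr (mid + 1) right
      else pvLoopA fuel arr left (mid - 1)
    else left

def findFistNegativeNum (arr : List Int) : Int :=
  pvLoopA (arr.length + 1) arr 0 ((arr.length : Int) - 1)

-- ===== PORT B =====
-- go(seg, base) from Source B: recursion on slices of the segment; fuel is again only a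
-- structural totality guard (each call strictly shrinks seg, so len(arr)+1 steps suffice)
def pvGoB : Nat → List Int → Int → Int
  | 0, _, base => base
  | fuel + 1, seg, base =>
    if seg = [] then base
    else
      let m := PySem.Int.floordiv ((seg.length : Int) - 1) 2
      if (PySem.List.pyGet? seg m).getD 0 ≥ 0 then
        pvGoB fuel (PySem.List.slice seg (some (m + 1)) none) (base + m + 1)
      else
        pvGoB fuel (PySem.List.slice seg none (some m)) base

def findFistNegativeNum_alt (arr : List Int) : Int :=
  pvGoB (arr.length + 1) arr 0

-- ===== PRECONDITION & SPEC =====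
def Spec_findFistNegativeNum (arr : List Int) (out : Int) : Prop := out = findFistNegativeNum_alt arr
instance (arr : List Int) (out : Int) : Decidable (Spec_findFistNegativeNum arr out) := by unfold Spec_findFistNegativeNum; infer_instance

-- ===== CLAIM (what is proved, stated in full; the proofs are below) =====
def Claim_equal_findFistNegativeNum : Prop := ∀ (arr : List Int), Dom_findFistNegativeNum arr → Spec_findFistNegativeNum arr (findFistNegativeNum arr)

-- ===== LEMMAS AND PROOFS =====

-- main invariant: the loop on (left, right) computes what go computes on the sublist arr[left..right]
lemma pvLoopA_eq_goB (fuel : Nat) :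
    ∀ (arr : List Int) (left right : Int),
      (right + 1 - left).toNat ≤ fuel → 0 ≤ left → right < (arr.length : Int) →
      pvLoopA fuel arr left right =
        pvGoB fuel ((arr.drop left.toNat).take (right + 1 - left).toNat) left := by
  induction fuel with
  | zero => intro arr left right hfuel h0 hr; rfl
  | succ fuel ih =>
    intro arr left right hfuel h0 hr
    by_cases h : left ≤ right
    · set L := left.toNat with hLdef
      set nn := (right + 1 - left).toNat with hnndef
      set seg := (arr.drop L).take nn with hsegdef
      set mNat := (nn - 1) / 2 with hmdef
      have hnn1 : 1 ≤ nn := by omega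
      have hlenA : right + 1 ≤ (arr.length : Int) := by omega
      have hseglen : seg.length = nn := by
        rw [hsegdef, List.length_take, List.length_drop]; omega
      have hsegne : seg ≠ [] := by
        intro hc; rw [hc] at hseglen; simp at hseglen; omega
      -- the two midpoints coincide
      have hfd : PySem.Int.floordiv (right - left) 2 = (mNat : Int) := by
        rw [PySem.Int.floordiv_eq_ediv_of_pos (by norm_num)]; omega
      have hfdB : PySem.Int.floordiv ((seg.length : Int) - 1) 2 = (mNat : Int) := by
        rw [hseglen, PySem.Int.floordiv_eq_ediv_of_pos (by norm_num)]; omega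
      have hmlt : mNat < nn := by omega
      -- both sides inspect the same element
      have hgetB : PySem.List.pyGet? seg (mNat : Int) = arr[L + mNat]? := by
        rw [PySem.List.pyGet?_natCast, hsegdef, List.getElem?_take_of_lt hmlt,
          List.getElem?_drop]
      have hmidc : left + (mNat : Int) = ((L + mNat : Nat) : Int) := by omega
      have hgetA : PySem.List.pyGet? arr (left + (mNat : Int)) = arr[L + mNat]? := by
        rw [hmidc, PySem.List.pyGet?_natCast]
      show (if left ≤ right then _ else left) = _
      rw [pvGoB]
      simp only [if_pos h, if_neg hsegne, hfd, hfdB, hgetA, hgetB]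
      by_cases hcmp : (arr[L + mNat]?.getD 0) ≥ 0
      · rw [if_pos hcmp, if_pos hcmp]
        have hslice : PySem.List.slice seg (some ((mNat : Int) + 1)) none =
            seg.drop (mNat + 1) := by
          have hc : ((mNat : Int) + 1) = ((mNat + 1 : Nat) : Int) := by push_cast; ring
          rw [hc, PySem.List.slice_from_natCast]
        have hdrop : seg.drop (mNat + 1) =
            (arr.drop (L + mNat + 1)).take (nn - (mNat + 1)) := by
          rw [hsegdef, List.drop_take, List.drop_drop]
          ring_nf
        have hIH := ih arr (left + (mNat : Int) + 1) right (by omega) (by omega) hr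
        have hnat1 : (left + (mNat : Int) + 1).toNat = L + mNat + 1 := by omega
        have hnat2 : (right + 1 - (left + (mNat : Int) + 1)).toNat = nn - (mNat + 1) := by omega
        rw [hnat1, hnat2] at hIH
        rw [hslice, hdrop, hIH]
      · rw [if_neg hcmp, if_neg hcmp]
        have hslice : PySem.List.slice seg none (some (mNat : Int)) = seg.take mNat :=
          PySem.List.slice_to_natCast seg mNat
        have htake : seg.take mNat = (arr.drop L).take mNat := by
          rw [hsegdef, List.take_take, min_eq_left (by omega)]
        have hIH := ih arr left (left + (mNat : Int) - 1) (by omega) h0 (by omega)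
        have hnat2 : (left + (mNat : Int) - 1 + 1 - left).toNat = mNat := by omega
        rw [hnat2] at hIH
        rw [hslice, htake, hIH]
    · have hz : (right + 1 - left).toNat = 0 := by omega
      show (if left ≤ right then _ else left) = _
      rw [hz, if_neg h]
      rfl

-- ===== VERDICT (by name: the statement is the Claim_ definition above) =====
theorem findFistNegativeNum_spec : Claim_equal_findFistNegativeNum := by
  intro arr _
  unfold Spec_findFistNegativeNum findFistNegativeNum findFistNegativeNum_alt
  have h := pvLoopA_eq_goB (arr.length + 1) arr 0 ((arr.length : Int) - 1)
    (by omega) (by omega) (by omega)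
  simpa using h
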